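-- pv_equiv track=rewrite | github.com/CTDKSKM/CodingTest | 프로그래머스/2/12923. 숫자 블록/숫자 블록.py | solution
-- ===== SOURCE A (Python) =====
-- def solution(begin, end):
--     answer = []
--     for i in range(begin, end+1):
--         temp = []
--         if i==1:
--             answer.append(0)
--             continue
--         for j in range(2,int(i**(1/2))+1):
--             if i%j==0 :
--                 if i//j>10**7:
--                     temp.append(j)
--                     continue
--                 else:
--                     answer.append(i//j)
--                     break
--         else:
--             if len(temp) > 0:
--                 answer.append(temp[len(temp)-1])
--             else:
--                 answer.append(1)
--     return answer
-- ===== SOURCE B (Python) =====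
-- def solution(begin, end):
--     K = 10 ** 7
--     answer = []
--     for i in range(begin, end + 1):
--         if i == 1:
--             answer.append(0)
--             continue
--         s = int(i ** 0.5)
--         m = i // (K + 1)          # j <= m  <=>  i // j > K
--         val = None
--         for j in range(max(2, m + 1), s + 1):
--             if i % j == 0:
--                 val = i // j
--                 break
--         if val is None:
--             val = 1
--             for j in range(min(m, s), 1, -1):
--                 if i % j == 0:
--                     val = j
--                     break
--         answer.append(val)
--     return answer
-- ===== Notes on version B (the rewrite author's own statement) =====
-- stated objective: alternative
-- what changed: Replaces A's temp-list/for-else machinery by an arithmetic threshold m = i//(10**7+1): one ascending scan over [max(2,m+1), sqrt(i)] for the first quotient, and otherwise a descending scan over [min(m,sqrt(i)), 2] for the first divisor.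
import Mathlib
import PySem

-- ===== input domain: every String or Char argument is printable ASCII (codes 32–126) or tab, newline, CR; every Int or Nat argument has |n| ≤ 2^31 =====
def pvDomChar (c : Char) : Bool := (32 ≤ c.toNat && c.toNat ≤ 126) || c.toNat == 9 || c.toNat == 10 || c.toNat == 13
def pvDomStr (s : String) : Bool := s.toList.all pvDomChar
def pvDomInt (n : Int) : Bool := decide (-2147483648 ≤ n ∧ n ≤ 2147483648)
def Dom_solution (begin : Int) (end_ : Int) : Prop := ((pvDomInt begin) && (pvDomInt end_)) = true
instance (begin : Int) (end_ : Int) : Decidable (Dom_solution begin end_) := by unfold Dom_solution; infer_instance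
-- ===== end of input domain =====

-- B replaces A's temp-list / for-else / break machinery by an arithmetic threshold
-- m = i // (10^7+1) and two directed scans (objective: alternative; same asymptotic cost).

-- int(i ** (1/2)) : equal to Nat.sqrt for the nonnegative ints admitted here (|i| ≤ 2^31);
-- for negative i Python raises TypeError (complex), excluded by Pre_solution.
def pvSqrt (i : Int) : Int := (Nat.sqrt i.toNat : Int)

-- ===== PORT A =====
-- the for-else terminal: 'if len(temp) > 0: temp[len(temp)-1] else: 1'
def pvTerm (temp : List Int) : Int :=
  if temp.length > 0 then (PySem.List.pyGet? temp ((temp.length : Int) - 1)).getD 0 else 1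

-- the inner 'for j in range(...)' loop with its temp list, break and for-else
def solutionInner (i : Int) : List Int → List Int → Int
  | [], temp => pvTerm temp
  | j :: rest, temp =>
    if PySem.Int.mod i j = 0 then
      if PySem.Int.floordiv i j > 10 ^ 7 then solutionInner i rest (temp ++ [j])
      else PySem.Int.floordiv i j
    else solutionInner i rest temp

def solution (begin : Int) (end_ : Int) : List Int :=
  (PySem.List.pyRange begin (end_ + 1) 1).map fun i =>
    if i = 1 then 0
    else solutionInner i (PySem.List.pyRange 2 (pvSqrt i + 1) 1) []

-- ===== PORT B =====
-- phase 1: first j in the ascending range with i % j == 0, giving i // j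
def firstQuot (i : Int) : List Int → Option Int
  | [] => none
  | j :: rest => if PySem.Int.mod i j = 0 then some (PySem.Int.floordiv i j) else firstQuot i rest

-- phase 2: first j in the descending range with i % j == 0, else 1
def firstDiv (i : Int) : List Int → Int
  | [] => 1
  | j :: rest => if PySem.Int.mod i j = 0 then j else firstDiv i rest

def solutionAltVal (i : Int) : Int :=
  let s := pvSqrt i
  let m := PySem.Int.floordiv i (10 ^ 7 + 1)
  match firstQuot i (PySem.List.pyRange (max 2 (m + 1)) (s + 1) 1) with
  | some q => q
  | none => firstDiv i (PySem.List.pyRange (min m s) 1 (-1))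

def solution_alt (begin : Int) (end_ : Int) : List Int :=
  (PySem.List.pyRange begin (end_ + 1) 1).map fun i =>
    if i = 1 then 0 else solutionAltVal i

-- ===== PRECONDITION & SPEC =====
-- Pre_ excludes a nonempty range starting below 0: there A computes (negative)**0.5, a complex
-- number, and int(...) raises TypeError (B raises the same way).
def Pre_solution (begin : Int) (end_ : Int) : Prop := 0 ≤ begin ∨ end_ < begin
instance (begin : Int) (end_ : Int) : Decidable (Pre_solution begin end_) := by
  unfold Pre_solution; infer_instance

def pvWitness_solution : Int × Int := (1, 12)

def Spec_solution (begin : Int) (end_ : Int) (out : List Int) : Prop := out = solution_alt begin end_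
instance (begin : Int) (end_ : Int) (out : List Int) : Decidable (Spec_solution begin end_ out) := by
  unfold Spec_solution; infer_instance

-- ===== CLAIM (what is proved, stated in full; the proofs are below) =====
def Claim_equal_solution : Prop := ∀ (begin : Int) (end_ : Int), Dom_solution begin end_ → Pre_solution begin end_ → Spec_solution begin end_ (solution begin end_)

-- ===== LEMMAS AND PROOFS =====

theorem pvTerm_append (temp : List Int) (x : Int) : pvTerm (temp ++ [x]) = x := by
  unfold pvTerm
  have h : (((temp ++ [x]).length : Nat) : Int) - 1 = ((temp.length : Nat) : Int) := by
    simp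
  rw [h, PySem.List.pyGet?_natCast]
  simp

-- 'i // j > 10^7' is the arithmetic threshold 'j ≤ i // (10^7 + 1)'
theorem quot_gt_iff (i j : Int) (hj : 0 < j) :
    10 ^ 7 < i / j ↔ j ≤ i / (10 ^ 7 + 1) := by
  constructor
  · intro h
    rw [Int.le_ediv_iff_mul_le (by norm_num)]
    have h' : (10 ^ 7 + 1) ≤ i / j := by omega
    have := (Int.le_ediv_iff_mul_le hj).1 h'
    nlinarith
  · intro h
    have := (Int.le_ediv_iff_mul_le (show (0:Int) < 10 ^ 7 + 1 by norm_num)).1 h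
    have h2 : 10 ^ 7 + 1 ≤ i / j := by
      rw [Int.le_ediv_iff_mul_le hj]; nlinarith
    omega

-- the central loop equivalence: A's temp/break loop from j0 equals B's two-phase value
theorem loop_eq (i s m : Int)
    (hm : m = PySem.Int.floordiv i (10 ^ 7 + 1)) (hms : m ≤ s) :
    ∀ n j0 temp, (s + 1 - j0).toNat = n → 2 ≤ j0 →
      pvTerm temp = firstDiv i (PySem.List.pyRange (min m (j0 - 1)) 1 (-1)) →
      solutionInner i (PySem.List.pyRange j0 (s + 1) 1) temp
        = match firstQuot i (PySem.List.pyRange (max j0 (m + 1)) (s + 1) 1) with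
          | some q => q
          | none => firstDiv i (PySem.List.pyRange (min m s) 1 (-1)) := by
  have hK : PySem.Int.floordiv i (10 ^ 7 + 1) = i / (10 ^ 7 + 1) :=
    PySem.Int.floordiv_eq_ediv_of_pos (by norm_num)
  intro n
  induction n with
  | zero =>
    intro j0 temp hn h2 ht
    have hj0s : s + 1 ≤ j0 := by omega
    rw [PySem.List.pyRange_one_eq_nil hj0s,
        PySem.List.pyRange_one_eq_nil (show s + 1 ≤ max j0 (m + 1) by omega)]
    have hmin : min m (j0 - 1) = m := by omega
    have hmin' : min m s = m := by omega
    rw [hmin] at ht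
    rw [hmin']
    simpa [solutionInner, firstQuot] using ht
  | succ n ih =>
    intro j0 temp hn h2 ht
    by_cases hlt : j0 < s + 1
    · have hj0 : (0:Int) < j0 := by omega
      rw [PySem.List.pyRange_one_cons hlt]
      simp only [solutionInner]
      rw [PySem.Int.mod_eq_emod_of_pos hj0]
      by_cases hd : i % j0 = 0
      · simp only [if_pos hd]
        rw [PySem.Int.floordiv_eq_ediv_of_pos hj0]
        by_cases hsmall : j0 ≤ m
        · -- i // j0 > 10^7 : A appends to temp; B's phase-1 range starts above j0 anyway
          have hbig : 10 ^ 7 < i / j0 := (quot_gt_iff i j0 hj0).2 (by rw [hm, hK] at hsmall; exact hsmall)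
          rw [if_pos hbig]
          have hmax : max j0 (m + 1) = m + 1 := by omega
          have hmax' : max (j0 + 1) (m + 1) = m + 1 := by omega
          rw [hmax, ← hmax']
          refine ih (j0 + 1) (temp ++ [j0]) (by omega) (by omega) ?_
          rw [pvTerm_append]
          have hmin : min m (j0 + 1 - 1) = j0 := by omega
          rw [hmin, PySem.List.pyRange_neg_one_cons (by omega : (1:Int) < j0)]
          simp [firstDiv, PySem.Int.mod_eq_emod_of_pos hj0, hd]
        · -- i // j0 ≤ 10^7 : A breaks with i // j0; B's phase 1 finds j0 first
          have hnbig : ¬ 10 ^ 7 < i / j0 := fun h =>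
            hsmall (by rw [hm, hK]; exact (quot_gt_iff i j0 hj0).1 h)
          rw [if_neg hnbig]
          have hmax : max j0 (m + 1) = j0 := by omega
          rw [hmax, PySem.List.pyRange_one_cons hlt]
          simp [firstQuot, PySem.Int.mod_eq_emod_of_pos hj0, hd,
                PySem.Int.floordiv_eq_ediv_of_pos hj0]
      · simp only [if_neg hd]
        have hfq : firstQuot i (PySem.List.pyRange (max j0 (m + 1)) (s + 1) 1)
            = firstQuot i (PySem.List.pyRange (max (j0 + 1) (m + 1)) (s + 1) 1) := by
          by_cases hsmall : j0 ≤ m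
          · have h1 : max j0 (m + 1) = m + 1 := by omega
            have h2' : max (j0 + 1) (m + 1) = m + 1 := by omega
            rw [h1, h2']
          · have h1 : max j0 (m + 1) = j0 := by omega
            have h2' : max (j0 + 1) (m + 1) = j0 + 1 := by omega
            rw [h1, h2', PySem.List.pyRange_one_cons hlt]
            simp [firstQuot, PySem.Int.mod_eq_emod_of_pos hj0, hd]
        rw [hfq]
        refine ih (j0 + 1) temp (by omega) (by omega) ?_
        rw [ht]
        by_cases hsmall : j0 ≤ m
        · have h1 : min m (j0 - 1) = j0 - 1 := by omega
          have h2' : min m (j0 + 1 - 1) = j0 := by omega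
          rw [h1, h2', PySem.List.pyRange_neg_one_cons (by omega : (1:Int) < j0)]
          simp [firstDiv, PySem.Int.mod_eq_emod_of_pos hj0, hd]
        · have : min m (j0 - 1) = min m (j0 + 1 - 1) := by omega
          rw [this]
    · omega

-- ===== VERDICT (by name: the statement is the Claim_ definition above) =====
theorem solution_spec : Claim_equal_solution := by
  intro begin end_ hdom hpre
  unfold Spec_solution solution solution_alt
  have hdom' : end_ ≤ 2147483648 := by
    unfold Dom_solution pvDomInt at hdom
    simp only [Bool.and_eq_true, decide_eq_true_eq] at hdom
    exact hdom.2.2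
  rcases hpre with hpre | hpre
  · apply List.map_congr_left
    intro i hi
    have hmem := PySem.List.mem_pyRange_one.1 hi
    have h0i : (0:Int) ≤ i := by omega
    have hi231 : i ≤ 2147483648 := by omega
    by_cases h1 : i = 1
    · simp [h1]
    · simp only [if_neg h1]
      have hs0 : (0:Int) ≤ pvSqrt i := Int.natCast_nonneg _
      have hss : pvSqrt i * pvSqrt i ≤ i := by
        unfold pvSqrt
        calc ((Nat.sqrt i.toNat : Int)) * ((Nat.sqrt i.toNat : Int))
            = ((Nat.sqrt i.toNat * Nat.sqrt i.toNat : Nat) : Int) := by push_cast; ring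
          _ ≤ (i.toNat : Int) := by exact_mod_cast Nat.sqrt_le i.toNat
          _ = i := Int.toNat_of_nonneg h0i
      have hub : i < (pvSqrt i + 1) * (pvSqrt i + 1) := by
        unfold pvSqrt
        have h := Nat.lt_succ_sqrt i.toNat
        calc i = (i.toNat : Int) := (Int.toNat_of_nonneg h0i).symm
          _ < (((Nat.sqrt i.toNat + 1) * (Nat.sqrt i.toNat + 1) : Nat) : Int) := by exact_mod_cast h
          _ = (pvSqrt i + 1) * (pvSqrt i + 1) := by unfold pvSqrt; push_cast; ring
      have hsK : pvSqrt i ≤ 10 ^ 7 := by nlinarith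
      have hK : PySem.Int.floordiv i (10 ^ 7 + 1) = i / (10 ^ 7 + 1) :=
        PySem.Int.floordiv_eq_ediv_of_pos (by norm_num)
      have hms : PySem.Int.floordiv i (10 ^ 7 + 1) ≤ pvSqrt i := by
        rw [hK]
        have : i / (10 ^ 7 + 1) < pvSqrt i + 1 := by
          rw [Int.ediv_lt_iff_lt_mul (by norm_num)]
          nlinarith
        omega
      have := loop_eq i (pvSqrt i) (PySem.Int.floordiv i (10 ^ 7 + 1)) rfl hms
        ((pvSqrt i + 1 - 2).toNat) 2 [] rfl le_rfl ?term
      · rw [this]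
        unfold solutionAltVal
        rfl
      · have hmin : min (PySem.Int.floordiv i (10 ^ 7 + 1)) (2 - 1) ≤ 1 := by omega
        rw [PySem.List.pyRange_neg_one_eq_nil hmin]
        simp [pvTerm, firstDiv]
  · rw [PySem.List.pyRange_one_eq_nil (by omega)]
    simp
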